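-- pv_equiv track=rewrite | github.com/olgalevkevich/Python_for_DQE | 4_Functions_Liaukevich.py | create_common_dict
-- ===== SOURCE A (Python) =====
-- def create_common_dict (input_dict_list) -> dict:
--
--     common_dict = {} # final common dictionary
--     common_list = [] # a list consisting of lists, each of which contains the number of an element in the original list, a dictionary key, and a dictionary value: [[0, 'a', 5], [0, 'b', 7]....]
--     initial_keys = [] # list for keys in dictionaries
--
--     # Create common_list list consisting of lists, each of which contains the number of an element in the original list, a dictionary key, and a dictionary value: [[0, 'a', 5], [0, 'b', 7]....]
--     for i in range(len(input_dict_list)):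
--         for key, value in input_dict_list[i].items():
--             new_list = [i, key, value]
--             common_list.append(new_list)
--
--     # Iterate through the elements of the created list, find identical keys, and if any subsequent elements have a value greater than the current one for the same key,
--     # then write the key with the index and the key value to the corresponding lists. set the flag to 1.
--     for element in common_list:
--         flag = 0
--         new_key = []
--         new_value = []
--         for i in range(len(common_list)-1):
--             if element[1] == common_list[i+1][1] and common_list[i+1][2] > element[2]: #
--                 new_key.append(common_list[i+1][1]+ '_' + str(common_list[i+1][0]+1))
--                 new_value.append(common_list[i+1][2])
--                 flag = 1
--         if flag == 1: # If the flag is 1, then find the maximum value and the key for this maximum value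
--             dict_value = max(new_value)
--             ind = new_value.index(max(new_value))
--             dict_key = new_key[ind]
--         else: # If the flag is 0 - that is, there are no identical keys --> then  take the value and key from the current element of the created common_list list
--             dict_value = element[2]
--             dict_key = element[1]
--     # Checking whether the original keys were written to the common dictionary.
--         if element[1] not in initial_keys:
--             common_dict[dict_key] = dict_value # if not - add element in common dictionary
--             initial_keys.append(element[1]) # After adding an element to the dictionary, save the original keys for subsequent verification.
--     return common_dict
-- ===== SOURCE B (Python) =====
-- def create_common_dict(input_dict_list) -> dict:
--     # One pass builds per-key tables (first value, running strict max with the dict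
--     # index that first achieved it); a second pass emits keys in first-appearance order.
--     entries = [(i, k, v) for i, d in enumerate(input_dict_list) for k, v in d.items()]
--     first_value = {}
--     best = {}           # key -> (max value so far, index of dict that first achieved it)
--     order = []          # keys in first-appearance order
--     for i, k, v in entries:
--         if k not in first_value:
--             first_value[k] = v
--             best[k] = (v, i)
--             order.append(k)
--         elif v > best[k][0]:
--             best[k] = (v, i)
--     result = {}
--     for k in order:
--         mv, mi = best[k]
--         if mv > first_value[k]:
--             result[k + '_' + str(mi + 1)] = mv
--         else:
--             result[k] = first_value[k]
--     return result
-- ===== Notes on version B (the rewrite author's own statement) =====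
-- stated objective: faster
-- what changed: B replaces A's flattened common_list with its quadratic inner rescan (for every element, re-scan the whole flattened list, collect all larger same-key values, then max+index over them) by a single pass that maintains per-key tables (first value; running strict max with the dict index that first achieved it) plus one emit pass over keys in first-appearance order.
import Mathlib
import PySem

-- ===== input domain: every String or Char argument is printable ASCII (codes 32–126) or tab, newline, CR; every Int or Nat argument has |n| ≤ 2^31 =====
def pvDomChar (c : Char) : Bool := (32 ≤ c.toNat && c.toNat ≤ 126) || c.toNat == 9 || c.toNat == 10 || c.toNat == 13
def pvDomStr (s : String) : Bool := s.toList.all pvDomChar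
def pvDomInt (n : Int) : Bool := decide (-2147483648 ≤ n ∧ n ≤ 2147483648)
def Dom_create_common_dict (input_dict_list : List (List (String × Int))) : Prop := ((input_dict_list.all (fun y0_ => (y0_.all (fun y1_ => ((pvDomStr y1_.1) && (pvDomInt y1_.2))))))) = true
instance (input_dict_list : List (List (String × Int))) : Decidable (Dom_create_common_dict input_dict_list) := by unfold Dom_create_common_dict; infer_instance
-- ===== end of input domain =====

-- B replaces A's flattened common_list and its quadratic inner rescan by one pass building
-- per-key tables (first value; running strict max with the dict index that first achieved it)
-- followed by a single emit pass over the keys in first-appearance order.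

-- boundary helper shared by both ports: Python's d.items() on a dict given as an assoc list
-- (duplicate keys collapse exactly as Python dict construction does)
def pvItems (d : List (String × Int)) : List (String × Int) := (PySem.Dict.ofList d).items

-- ===== PORT A =====
def create_common_dict (input_dict_list : List (List (String × Int))) : List (String × Int) :=
  -- for i in range(len(input_dict_list)): for key, value in input_dict_list[i].items(): common_list.append([i, key, value])
  let common_list : List (Int × String × Int) :=
    (PySem.List.enumerate input_dict_list 0).foldl
      (fun acc p => (pvItems p.2).foldl (fun acc kv => acc ++ [(p.1, kv.1, kv.2)]) acc) []
  let final :=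
    common_list.foldl
      (fun (st : PySem.Dict String Int × List String) element =>
        -- for i in range(len(common_list)-1): common_list[i+1] …  — i.e. a scan of common_list's tail
        let inner :=
          (common_list.drop 1).foldl
            (fun (s : Bool × List String × List Int) c =>
              if element.2.1 == c.2.1 && c.2.2 > element.2.2 then
                (true, s.2.1 ++ [c.2.1 ++ "_" ++ PySem.Int.toStr (c.1 + 1)], s.2.2 ++ [c.2.2])
              else s)
            (false, [], [])
        let dict_value := if inner.1 then (PySem.List.max? inner.2.2 (fun y => y)).getD 0 else element.2.2
        let dict_key :=
          if inner.1 then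
            (PySem.List.pyGet? inner.2.1
              (((PySem.List.index? inner.2.2 ((PySem.List.max? inner.2.2 (fun y => y)).getD 0)).getD 0 : Nat) : Int)).getD ""
          else element.2.1
        if st.2.contains element.2.1 then st
        else (st.1.insert dict_key dict_value, st.2 ++ [element.2.1]))
      (PySem.Dict.empty, [])
  final.1.items

-- ===== PORT B =====
def create_common_dict_alt (input_dict_list : List (List (String × Int))) : List (String × Int) :=
  let entries : List (Int × String × Int) :=
    (PySem.List.enumerate input_dict_list 0).flatMap
      (fun p => (pvItems p.2).map (fun kv => (p.1, kv.1, kv.2)))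
  let tables :=
    entries.foldl
      (fun (st : PySem.Dict String Int × PySem.Dict String (Int × Int) × List String) e =>
        if st.1.contains e.2.1 then
          if e.2.2 > (st.2.1.getD e.2.1 (0, 0)).1 then
            (st.1, st.2.1.insert e.2.1 (e.2.2, e.1), st.2.2)
          else st
        else (st.1.insert e.2.1 e.2.2, st.2.1.insert e.2.1 (e.2.2, e.1), st.2.2 ++ [e.2.1]))
      (PySem.Dict.empty, PySem.Dict.empty, [])
  (tables.2.2.foldl
    (fun (res : PySem.Dict String Int) k =>
      if (tables.2.1.getD k (0, 0)).1 > tables.1.getD k 0 then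
        res.insert (k ++ "_" ++ PySem.Int.toStr ((tables.2.1.getD k (0, 0)).2 + 1)) (tables.2.1.getD k (0, 0)).1
      else res.insert k (tables.1.getD k 0))
    PySem.Dict.empty).items

-- ===== PRECONDITION & SPEC =====
def Spec_create_common_dict (input_dict_list : List (List (String × Int))) (out : List (String × Int)) : Prop := out = create_common_dict_alt input_dict_list
instance (input_dict_list : List (List (String × Int))) (out : List (String × Int)) : Decidable (Spec_create_common_dict input_dict_list out) := by unfold Spec_create_common_dict; infer_instance

-- ===== CLAIM (what is proved, stated in full; the proofs are below) =====
def Claim_equal_create_common_dict : Prop := ∀ (input_dict_list : List (List (String × Int))), Dom_create_common_dict input_dict_list → Spec_create_common_dict input_dict_list (create_common_dict input_dict_list)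

-- ===== LEMMAS AND PROOFS =====

-- the pair (dict_key, dict_value) A computes for an element, as a function of the scanned tail T
def aPair (T : List (Int × String × Int)) (e : Int × String × Int) : String × Int :=
  let inner :=
    T.foldl
      (fun (s : Bool × List String × List Int) c =>
        if e.2.1 == c.2.1 && c.2.2 > e.2.2 then
          (true, s.2.1 ++ [c.2.1 ++ "_" ++ PySem.Int.toStr (c.1 + 1)], s.2.2 ++ [c.2.2])
        else s)
      (false, [], [])
  let dict_value := if inner.1 then (PySem.List.max? inner.2.2 (fun y => y)).getD 0 else e.2.2
  let dict_key :=
    if inner.1 then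
      (PySem.List.pyGet? inner.2.1
        (((PySem.List.index? inner.2.2 ((PySem.List.max? inner.2.2 (fun y => y)).getD 0)).getD 0 : Nat) : Int)).getD ""
    else e.2.1
  (dict_key, dict_value)

def aPairOf (e : Int × String × Int) (inner : Bool × List String × List Int) : String × Int :=
  (if inner.1 then
      (PySem.List.pyGet? inner.2.1
        (((PySem.List.index? inner.2.2 ((PySem.List.max? inner.2.2 (fun y => y)).getD 0)).getD 0 : Nat) : Int)).getD ""
    else e.2.1,
   if inner.1 then (PySem.List.max? inner.2.2 (fun y => y)).getD 0 else e.2.2)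

lemma aPair_eq_aPairOf (T : List (Int × String × Int)) (e : Int × String × Int) :
    aPair T e = aPairOf e (T.foldl
      (fun (s : Bool × List String × List Int) c =>
        if e.2.1 == c.2.1 && c.2.2 > e.2.2 then
          (true, s.2.1 ++ [c.2.1 ++ "_" ++ PySem.Int.toStr (c.1 + 1)], s.2.2 ++ [c.2.2])
        else s)
      (false, [], [])) := rfl

-- the pair B emits for a key (f = first value, b = (max value, dict index))
def emitPair (k : String) (f : Int) (b : Int × Int) : String × Int :=
  if b.1 > f then (k ++ "_" ++ PySem.Int.toStr (b.2 + 1), b.1) else (k, f)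

-- B's per-key best update
def upd (k : String) (b : Int × Int) (c : Int × String × Int) : Int × Int :=
  if c.2.1 == k && c.2.2 > b.1 then (c.2.2, c.1) else b

-- the sublist of first occurrences of keys not yet in `seen`
def firstOccs (seen : List String) : List (Int × String × Int) → List (Int × String × Int)
  | [] => []
  | e :: t => if seen.contains e.2.1 then firstOccs seen t else e :: firstOccs (seen ++ [e.2.1]) t

-- B's tables step
def bstep (st : PySem.Dict String Int × PySem.Dict String (Int × Int) × List String)
    (e : Int × String × Int) : PySem.Dict String Int × PySem.Dict String (Int × Int) × List String :=
  if st.1.contains e.2.1 then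
    if e.2.2 > (st.2.1.getD e.2.1 (0, 0)).1 then
      (st.1, st.2.1.insert e.2.1 (e.2.2, e.1), st.2.2)
    else st
  else (st.1.insert e.2.1 e.2.2, st.2.1.insert e.2.1 (e.2.2, e.1), st.2.2 ++ [e.2.1])

lemma aInner_gen (k : String) (v : Int) (T : List (Int × String × Int))
    (s : Bool × List String × List Int) :
    T.foldl
      (fun (s : Bool × List String × List Int) c =>
        if k == c.2.1 && c.2.2 > v then
          (true, s.2.1 ++ [c.2.1 ++ "_" ++ PySem.Int.toStr (c.1 + 1)], s.2.2 ++ [c.2.2])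
        else s)
      s
    = ((s.1 || T.any (fun c => k == c.2.1 && c.2.2 > v)),
       s.2.1 ++ (T.filter (fun c => k == c.2.1 && c.2.2 > v)).map (fun c => c.2.1 ++ "_" ++ PySem.Int.toStr (c.1 + 1)),
       s.2.2 ++ (T.filter (fun c => k == c.2.1 && c.2.2 > v)).map (fun c => c.2.2)) := by
  induction T generalizing s with
  | nil => simp
  | cons c t ih =>
    rw [List.foldl_cons]
    by_cases h : (k == c.2.1 && decide (c.2.2 > v)) = true
    · rw [if_pos h, ih, List.any_cons]
      simp [h]
    · rw [if_neg h, ih, List.any_cons]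
      simp [h]

lemma max_index_split (A1 A2 : List Int) (m : Int)
    (h1 : ∀ a ∈ A1, a < m) (h2 : ∀ a ∈ A2, a ≤ m) :
    PySem.List.max? (A1 ++ m :: A2) (fun y => y) = some m ∧
    PySem.List.index? (A1 ++ m :: A2) m = some A1.length := by
  constructor
  · have hne : (A1 ++ m :: A2) ≠ [] := by simp
    obtain ⟨z, hz⟩ : ∃ z, PySem.List.max? (A1 ++ m :: A2) (fun y => y) = some z := by
      cases hmx : PySem.List.max? (A1 ++ m :: A2) (fun y => y) with
      | none => exact absurd ((PySem.List.max?_eq_none_iff _ _).1 hmx) hne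
      | some z => exact ⟨z, rfl⟩
    have hmem := PySem.List.max?_mem hz
    have hmax := PySem.List.max?_isMax hz
    have hzm : z ≤ m := by
      rcases List.mem_append.mp hmem with h | h
      · exact le_of_lt (h1 z h)
      · rcases List.mem_cons.mp h with h | h
        · omega
        · exact h2 z h
    have hmz : m ≤ z := hmax m (by simp)
    rw [hz, le_antisymm hzm hmz]
  · rw [PySem.List.index?_eq_some_iff]
    exact ⟨A1, A2, rfl, rfl, fun hm => absurd (h1 m hm) (by omega)⟩

lemma upd_spec (k : String) (post : List (Int × String × Int)) (b0 : Int × Int) :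
    (post.foldl (upd k) b0 = b0 ∧ ∀ x ∈ post, x.2.1 = k → x.2.2 ≤ b0.1)
    ∨ (∃ p1 x p2, post = p1 ++ x :: p2 ∧ x.2.1 = k ∧ post.foldl (upd k) b0 = (x.2.2, x.1) ∧ b0.1 < x.2.2
        ∧ (∀ y ∈ p1, y.2.1 = k → y.2.2 < x.2.2) ∧ (∀ y ∈ p2, y.2.1 = k → y.2.2 ≤ x.2.2)) := by
  induction post generalizing b0 with
  | nil => left; simp
  | cons z t ih =>
    rw [List.foldl_cons]
    by_cases hz : (z.2.1 == k && decide (z.2.2 > b0.1)) = true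
    · simp only [Bool.and_eq_true, beq_iff_eq, decide_eq_true_eq] at hz
      have hupd : upd k b0 z = (z.2.2, z.1) := by
        simp [upd, hz.1, hz.2]
      rw [hupd]
      rcases ih (z.2.2, z.1) with ⟨he, hle⟩ | ⟨p1, x, p2, ht, hxk, hfold, hlt, hbef, haft⟩
      · right
        exact ⟨[], z, t, rfl, hz.1, he, hz.2, by simp, by simpa using hle⟩
      · right
        refine ⟨z :: p1, x, p2, by rw [ht]; rfl, hxk, hfold, lt_trans hz.2 hlt, ?_, haft⟩
        intro y hy hyk
        rcases List.mem_cons.mp hy with rfl | hy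
        · simpa using hlt
        · exact hbef y hy hyk
    · simp only [Bool.and_eq_true, beq_iff_eq, decide_eq_true_eq, not_and, not_lt] at hz
      have hupd : upd k b0 z = b0 := by
        simp only [upd, Bool.and_eq_true, beq_iff_eq, decide_eq_true_eq]
        rw [if_neg]; rintro ⟨h1, h2⟩; exact absurd h2 (not_lt.mpr (hz h1))
      rw [hupd]
      rcases ih b0 with ⟨he, hle⟩ | ⟨p1, x, p2, ht, hxk, hfold, hlt, hbef, haft⟩
      · left
        refine ⟨he, ?_⟩
        intro x hx hxk
        rcases List.mem_cons.mp hx with rfl | hx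
        · exact hz hxk
        · exact hle x hx hxk
      · right
        refine ⟨z :: p1, x, p2, by rw [ht]; rfl, hxk, hfold, hlt, ?_, haft⟩
        intro y hy hyk
        rcases List.mem_cons.mp hy with rfl | hy
        · exact lt_of_le_of_lt (hz hyk) hlt
        · exact hbef y hy hyk

lemma firstOccs_spec (L : List (Int × String × Int)) (ks : List String) (e : Int × String × Int)
    (h : e ∈ firstOccs ks L) :
    e.2.1 ∉ ks ∧ ∃ pre post, L = pre ++ e :: post ∧ ∀ x ∈ pre, x.2.1 ≠ e.2.1 := by
  induction L generalizing ks with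
  | nil => simp [firstOccs] at h
  | cons z t ih =>
    rw [firstOccs] at h
    by_cases hz : (ks.contains z.2.1) = true
    · rw [if_pos hz] at h
      obtain ⟨hnot, pre, post, heq, hpre⟩ := ih ks h
      refine ⟨hnot, z :: pre, post, by rw [heq]; rfl, ?_⟩
      intro x hx
      rcases List.mem_cons.mp hx with rfl | hx
      · intro hc
        exact hnot (by rw [← hc]; exact List.contains_iff_mem.mp hz)
      · exact hpre x hx
    · rw [if_neg hz] at h
      rcases List.mem_cons.mp h with rfl | h
      · exact ⟨fun hc => hz (List.contains_iff_mem.mpr hc), [], t, rfl, by simp⟩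
      · obtain ⟨hnot, pre, post, heq, hpre⟩ := ih (ks ++ [z.2.1]) h
        have hks : e.2.1 ∉ ks := fun hc => hnot (by simp [hc])
        refine ⟨hks, z :: pre, post, by rw [heq]; rfl, ?_⟩
        intro x hx
        rcases List.mem_cons.mp hx with rfl | hx
        · intro hc
          exact hnot (by simp [hc])
        · exact hpre x hx

lemma foldl_dedup_insert (f : Int × String × Int → String × Int) (L : List (Int × String × Int))
    (d : PySem.Dict String Int) (ks : List String) :
    L.foldl (fun st e => if st.2.contains e.2.1 then st
        else (st.1.insert (f e).1 (f e).2, st.2 ++ [e.2.1])) (d, ks)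
    = ((firstOccs ks L).foldl (fun d e => d.insert (f e).1 (f e).2) d,
       ks ++ (firstOccs ks L).map (fun e => e.2.1)) := by
  induction L generalizing d ks with
  | nil => simp [firstOccs]
  | cons z t ih =>
    rw [List.foldl_cons, firstOccs]
    by_cases hz : (ks.contains z.2.1) = true
    · rw [if_pos hz, if_pos hz, ih]
    · rw [if_neg hz, if_neg hz, ih]
      simp

lemma b_order (L : List (Int × String × Int))
    (st : PySem.Dict String Int × PySem.Dict String (Int × Int) × List String) (ks : List String)
    (h : ∀ s, st.1.contains s = ks.contains s) :
    (L.foldl bstep st).2.2 = st.2.2 ++ (firstOccs ks L).map (fun e => e.2.1) := by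
  induction L generalizing st ks with
  | nil => simp [firstOccs]
  | cons z t ih =>
    rw [List.foldl_cons, firstOccs]
    by_cases hz : (ks.contains z.2.1) = true
    · rw [if_pos hz]
      have hc : st.1.contains z.2.1 = true := by rw [h]; exact hz
      by_cases hgt : (decide (z.2.2 > (st.2.1.getD z.2.1 (0, 0)).1)) = true
      · have : bstep st z = (st.1, st.2.1.insert z.2.1 (z.2.2, z.1), st.2.2) := by
          simp only [bstep, hc, if_true]
          rw [if_pos (by simpa using hgt)]
        rw [this, ih _ ks (by exact h)]
      · have : bstep st z = st := by
          simp only [bstep, hc, if_true]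
          rw [if_neg (by simpa using hgt)]
        rw [this, ih _ ks h]
    · rw [if_neg hz]
      have hc : st.1.contains z.2.1 = false := by rw [h]; simpa using hz
      have : bstep st z = (st.1.insert z.2.1 z.2.2, st.2.1.insert z.2.1 (z.2.2, z.1), st.2.2 ++ [z.2.1]) := by
        simp [bstep, hc]
      rw [this, ih _ (ks ++ [z.2.1])]
      · simp
      · intro s
        rw [PySem.Dict.contains_insert, h s]
        cases hb : s == z.2.1
        · simp only [List.contains_append, List.contains_cons, hb]
          simp
        · simp only [List.contains_append, List.contains_cons, hb]
          simp

lemma bstep_frame (st : PySem.Dict String Int × PySem.Dict String (Int × Int) × List String)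
    (x : Int × String × Int) (k : String) (hne : x.2.1 ≠ k) :
    (bstep st x).1.contains k = st.1.contains k ∧
    (bstep st x).1.getD k 0 = st.1.getD k 0 ∧
    (bstep st x).2.1.getD k (0, 0) = st.2.1.getD k (0, 0) := by
  have hne' : k ≠ x.2.1 := fun h => hne h.symm
  unfold bstep
  split
  · split
    · exact ⟨rfl, rfl, by rw [PySem.Dict.getD_insert, if_neg hne']⟩
    · exact ⟨rfl, rfl, rfl⟩
  · refine ⟨?_, ?_, ?_⟩
    · rw [PySem.Dict.contains_insert]
      have : (k == x.2.1) = false := beq_false_of_ne hne'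
      rw [this, Bool.false_or]
    · rw [PySem.Dict.getD_insert, if_neg hne']
    · rw [PySem.Dict.getD_insert, if_neg hne']

lemma b_pre (k : String) (pre : List (Int × String × Int))
    (st : PySem.Dict String Int × PySem.Dict String (Int × Int) × List String)
    (h : ∀ x ∈ pre, x.2.1 ≠ k) :
    (pre.foldl bstep st).1.contains k = st.1.contains k ∧
    (pre.foldl bstep st).2.1.getD k (0, 0) = st.2.1.getD k (0, 0) := by
  induction pre generalizing st with
  | nil => exact ⟨rfl, rfl⟩
  | cons z t ih =>
    rw [List.foldl_cons]
    obtain ⟨h1, _, h3⟩ := bstep_frame st z k (h z (by simp))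
    obtain ⟨g1, g3⟩ := ih (bstep st z) (fun x hx => h x (by simp [hx]))
    exact ⟨g1.trans h1, g3.trans h3⟩

lemma b_post (k : String) (post : List (Int × String × Int))
    (st : PySem.Dict String Int × PySem.Dict String (Int × Int) × List String)
    (h : st.1.contains k = true) :
    (post.foldl bstep st).1.getD k 0 = st.1.getD k 0 ∧
    (post.foldl bstep st).2.1.getD k (0, 0) = post.foldl (upd k) (st.2.1.getD k (0, 0)) := by
  induction post generalizing st with
  | nil => exact ⟨rfl, rfl⟩
  | cons z t ih =>
    rw [List.foldl_cons, List.foldl_cons]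
    by_cases hzk : z.2.1 = k
    · -- same key: contains is true, inner if matches upd
      subst hzk
      have hcontains : (bstep st z).1.contains z.2.1 = true := by
        unfold bstep
        rw [if_pos h]
        split <;> simp [h]
      by_cases hgt : z.2.2 > (st.2.1.getD z.2.1 (0, 0)).1
      · have hb : bstep st z = (st.1, st.2.1.insert z.2.1 (z.2.2, z.1), st.2.2) := by
          unfold bstep; rw [if_pos h, if_pos (by simpa using hgt)]
        have hu : upd z.2.1 (st.2.1.getD z.2.1 (0, 0)) z = (z.2.2, z.1) := by
          simp [upd, hgt]
        rw [hb, hu]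
        obtain ⟨g1, g2⟩ := ih (st.1, st.2.1.insert z.2.1 (z.2.2, z.1), st.2.2) h
        refine ⟨g1, ?_⟩
        rw [g2]
        simp only []
        rw [PySem.Dict.getD_insert_self]
      · have hb : bstep st z = st := by
          unfold bstep; rw [if_pos h, if_neg (by simpa using hgt)]
        have hu : upd z.2.1 (st.2.1.getD z.2.1 (0, 0)) z = st.2.1.getD z.2.1 (0, 0) := by
          simp only [upd]
          rw [if_neg]
          simp only [Bool.and_eq_true, beq_iff_eq, decide_eq_true_eq, not_and]
          intro _; omega
        rw [hb, hu]
        exact ih st h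
    · obtain ⟨h1, h2, h3⟩ := bstep_frame st z k hzk
      have hu : upd k (st.2.1.getD k (0, 0)) z = st.2.1.getD k (0, 0) := by
        simp only [upd]
        rw [if_neg]
        simp [hzk]
      obtain ⟨g1, g2⟩ := ih (bstep st z) (h1.trans h)
      rw [hu]
      exact ⟨g1.trans h2, by rw [g2, h3]⟩

lemma pair_eq (L pre post : List (Int × String × Int)) (e : Int × String × Int)
    (hL : L = pre ++ e :: post) (hpre : ∀ x ∈ pre, x.2.1 ≠ e.2.1) :
    aPair (L.drop 1) e = emitPair e.2.1 e.2.2 (post.foldl (upd e.2.1) (e.2.2, e.1)) := by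
  set k := e.2.1 with hk
  set v0 := e.2.2 with hv0
  have hself : ¬ ((k == k && decide (v0 > v0)) = true) := by simp
  have hfilter : (L.drop 1).filter (fun c => k == c.2.1 && c.2.2 > v0)
      = post.filter (fun c => k == c.2.1 && c.2.2 > v0) := by
    subst hL
    cases pre with
    | nil =>
      simp only [List.nil_append, List.drop_succ_cons, List.drop_zero]
    | cons p0 pt =>
      have hpt : ∀ x ∈ pt, ¬ ((k == x.2.1 && decide (x.2.2 > v0)) = true) := by
        intro x hx hcontr
        have h1 := hpre x (List.mem_cons_of_mem _ hx)
        have h2 : k = x.2.1 := by simpa using ((Bool.and_eq_true _ _).mp hcontr).1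
        exact h1 h2.symm
      simp only [List.cons_append, List.drop_succ_cons, List.drop_zero]
      rw [List.filter_append, List.filter_eq_nil_iff.mpr hpt]
      simp only [List.filter_cons]
      rw [if_neg hself, List.nil_append]
  rw [aPair_eq_aPairOf, aInner_gen k v0]
  rcases upd_spec k post (v0, e.1) with ⟨hfold, hle⟩ | ⟨p1, x, p2, hpost, hxk, hfold, hlt, hbef, haft⟩
  · -- no same-key entry beats v0: A keeps (k, v0), B's best never moved
    have hnil : post.filter (fun c => k == c.2.1 && c.2.2 > v0) = [] := by
      apply List.filter_eq_nil_iff.mpr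
      intro y hy hcontr
      obtain ⟨hb1, hb2⟩ := (Bool.and_eq_true _ _).mp hcontr
      have hyk' : k = y.2.1 := by simpa using hb1
      have hyk : y.2.1 = k := hyk'.symm
      have hle' : y.2.2 ≤ v0 := hle y hy hyk
      have hgt : v0 < y.2.2 := by simpa using hb2
      omega
    have hflag : (L.drop 1).any (fun c => k == c.2.1 && c.2.2 > v0) = false := by
      rw [List.any_eq_false]
      exact List.filter_eq_nil_iff.mp (hfilter.trans hnil)
    rw [hfold]
    unfold aPairOf emitPair
    simp only [Bool.false_or, hflag, Bool.false_eq_true, if_false]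
    have hnotgt : ¬ ((v0, e.1).1 > v0) := by simp
    rw [if_neg hnotgt]
  · -- the strict running max ends at x: A renames with x's dict index and value
    have hvx : v0 < x.2.2 := by simpa using hlt
    have hp : (k == x.2.1 && decide (x.2.2 > v0)) = true := by
      simp [hxk, hvx]
    have hcands : (L.drop 1).filter (fun c => k == c.2.1 && c.2.2 > v0)
        = p1.filter (fun c => k == c.2.1 && c.2.2 > v0) ++ x :: p2.filter (fun c => k == c.2.1 && c.2.2 > v0) := by
      rw [hfilter, hpost, List.filter_append]
      simp only [List.filter_cons]
      rw [if_pos hp]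
    have hflag : (L.drop 1).any (fun c => k == c.2.1 && c.2.2 > v0) = true := by
      rw [List.any_eq_true]
      refine ⟨x, ?_, hp⟩
      have hmem : x ∈ (L.drop 1).filter (fun c => k == c.2.1 && c.2.2 > v0) := by
        rw [hcands]; exact List.mem_append_right _ (List.mem_cons_self)
      exact (List.mem_filter.mp hmem).1
    have hkeyOf : ∀ y ∈ p1.filter (fun c => k == c.2.1 && c.2.2 > v0), y.2.2 < x.2.2 := by
      intro y hy
      obtain ⟨hmem, hpy⟩ := List.mem_filter.mp hy
      obtain ⟨hb1, _⟩ := (Bool.and_eq_true _ _).mp hpy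
      have hyk' : k = y.2.1 := by simpa using hb1
      exact hbef y hmem hyk'.symm
    have hkeyOf2 : ∀ y ∈ p2.filter (fun c => k == c.2.1 && c.2.2 > v0), y.2.2 ≤ x.2.2 := by
      intro y hy
      obtain ⟨hmem, hpy⟩ := List.mem_filter.mp hy
      obtain ⟨hb1, _⟩ := (Bool.and_eq_true _ _).mp hpy
      have hyk' : k = y.2.1 := by simpa using hb1
      exact haft y hmem hyk'.symm
    obtain ⟨hmax, hind⟩ := max_index_split
      ((p1.filter (fun c => k == c.2.1 && c.2.2 > v0)).map (fun c => c.2.2))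
      ((p2.filter (fun c => k == c.2.1 && c.2.2 > v0)).map (fun c => c.2.2))
      x.2.2
      (by intro a ha; obtain ⟨y, hy, rfl⟩ := List.mem_map.mp ha; exact hkeyOf y hy)
      (by intro a ha; obtain ⟨y, hy, rfl⟩ := List.mem_map.mp ha; exact hkeyOf2 y hy)
    rw [hfold]
    unfold aPairOf emitPair
    simp only [Bool.false_or, hflag, if_true, hcands, List.map_append, List.map_cons,
      List.nil_append]
    rw [hmax]
    simp only [Option.getD_some]
    rw [hind]
    simp only [Option.getD_some, List.length_map]
    have hgetk : PySem.List.pyGet?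
        ((p1.filter (fun c => k == c.2.1 && c.2.2 > v0)).map (fun c => c.2.1 ++ "_" ++ PySem.Int.toStr (c.1 + 1))
          ++ (x.2.1 ++ "_" ++ PySem.Int.toStr (x.1 + 1))
            :: (p2.filter (fun c => k == c.2.1 && c.2.2 > v0)).map (fun c => c.2.1 ++ "_" ++ PySem.Int.toStr (c.1 + 1)))
        (((p1.filter (fun c => k == c.2.1 && c.2.2 > v0)).length : Nat) : Int)
        = some (x.2.1 ++ "_" ++ PySem.Int.toStr (x.1 + 1)) := by
      rw [show (((p1.filter (fun c => k == c.2.1 && c.2.2 > v0)).length : Nat) : Int)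
            = (((p1.filter (fun c => k == c.2.1 && c.2.2 > v0)).map (fun c => c.2.1 ++ "_" ++ PySem.Int.toStr (c.1 + 1))).length : Int) by
          rw [List.length_map]]
      exact PySem.List.pyGet?_append_length _ _ _
    rw [hgetk]
    simp only [Option.getD_some]
    have hgtv : x.2.2 > v0 := hvx
    rw [if_pos hgtv, hxk]


lemma bstep_new (st : PySem.Dict String Int × PySem.Dict String (Int × Int) × List String)
    (e : Int × String × Int) (h : st.1.contains e.2.1 = false) :
    bstep st e = (st.1.insert e.2.1 e.2.2, st.2.1.insert e.2.1 (e.2.2, e.1), st.2.2 ++ [e.2.1]) := by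
  unfold bstep
  rw [if_neg (by rw [h]; exact Bool.false_ne_true)]

lemma b_tables (L pre post : List (Int × String × Int)) (e : Int × String × Int)
    (hL : L = pre ++ e :: post) (hpre : ∀ x ∈ pre, x.2.1 ≠ e.2.1) :
    (L.foldl bstep (PySem.Dict.empty, PySem.Dict.empty, [])).1.getD e.2.1 0 = e.2.2 ∧
    (L.foldl bstep (PySem.Dict.empty, PySem.Dict.empty, [])).2.1.getD e.2.1 (0, 0)
      = post.foldl (upd e.2.1) (e.2.2, e.1) := by
  subst hL
  rw [List.foldl_append, List.foldl_cons]
  obtain ⟨hpc, hpb⟩ := b_pre e.2.1 pre (PySem.Dict.empty, PySem.Dict.empty, []) hpre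
  have hc1 : (pre.foldl bstep (PySem.Dict.empty, PySem.Dict.empty,
      ([] : List String))).1.contains e.2.1 = false := by
    rw [hpc]; simp
  rw [bstep_new _ e hc1]
  obtain ⟨g1, g2⟩ := b_post e.2.1 post
    ((pre.foldl bstep (PySem.Dict.empty, PySem.Dict.empty, [])).1.insert e.2.1 e.2.2,
     (pre.foldl bstep (PySem.Dict.empty, PySem.Dict.empty, [])).2.1.insert e.2.1 (e.2.2, e.1),
     (pre.foldl bstep (PySem.Dict.empty, PySem.Dict.empty, [])).2.2 ++ [e.2.1])
    (by dsimp only; simp)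
  refine ⟨?_, ?_⟩
  · rw [g1]; dsimp only; rw [PySem.Dict.getD_insert_self]
  · rw [g2]; dsimp only; rw [PySem.Dict.getD_insert_self]

-- ===== VERDICT (by name: the statement is the Claim_ definition above) =====
theorem create_common_dict_spec : Claim_equal_create_common_dict := by
  unfold Claim_equal_create_common_dict
  intro input _
  unfold Spec_create_common_dict
  simp only [create_common_dict, create_common_dict_alt]
  have hstep : (fun (acc : List (Int × String × Int)) (p : Int × List (String × Int)) =>
        (pvItems p.2).foldl (fun acc kv => acc ++ [(p.1, kv.1, kv.2)]) acc)
      = (fun acc p => acc ++ (pvItems p.2).map (fun kv => (p.1, kv.1, kv.2))) := by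
    funext acc p
    exact PySem.List.foldl_append_singleton_eq_map _ _ _
  rw [hstep, PySem.List.foldl_append_eq_flatMap, List.nil_append]
  set L := (PySem.List.enumerate input 0).flatMap
      (fun p => (pvItems p.2).map (fun kv => (p.1, kv.1, kv.2))) with hLdef
  have hAstep : (fun (st : PySem.Dict String Int × List String) element =>
        let inner :=
          (L.drop 1).foldl
            (fun (s : Bool × List String × List Int) c =>
              if element.2.1 == c.2.1 && c.2.2 > element.2.2 then
                (true, s.2.1 ++ [c.2.1 ++ "_" ++ PySem.Int.toStr (c.1 + 1)], s.2.2 ++ [c.2.2])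
              else s)
            (false, [], [])
        let dict_value := if inner.1 then (PySem.List.max? inner.2.2 (fun y => y)).getD 0 else element.2.2
        let dict_key :=
          if inner.1 then
            (PySem.List.pyGet? inner.2.1
              (((PySem.List.index? inner.2.2 ((PySem.List.max? inner.2.2 (fun y => y)).getD 0)).getD 0 : Nat) : Int)).getD ""
          else element.2.1
        if st.2.contains element.2.1 then st
        else (st.1.insert dict_key dict_value, st.2 ++ [element.2.1]))
      = (fun st element => if st.2.contains element.2.1 then st
          else (st.1.insert (aPair (L.drop 1) element).1 (aPair (L.drop 1) element).2,
                st.2 ++ [element.2.1])) := rfl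
  rw [hAstep, foldl_dedup_insert]
  have hBstep : (fun (st : PySem.Dict String Int × PySem.Dict String (Int × Int) × List String) e =>
        if st.1.contains e.2.1 then
          if e.2.2 > (st.2.1.getD e.2.1 (0, 0)).1 then
            (st.1, st.2.1.insert e.2.1 (e.2.2, e.1), st.2.2)
          else st
        else (st.1.insert e.2.1 e.2.2, st.2.1.insert e.2.1 (e.2.2, e.1), st.2.2 ++ [e.2.1]))
      = bstep := rfl
  rw [hBstep]
  rw [b_order L (PySem.Dict.empty, PySem.Dict.empty, []) [] (by intro s; simp)]
  dsimp only
  rw [List.nil_append, List.foldl_map]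
  congr 1
  apply PySem.List.foldl_congr_mem'
  intro e he res
  obtain ⟨-, pre, post, hdec, hpre⟩ := firstOccs_spec L [] e he
  obtain ⟨hfv, hbest⟩ := b_tables L pre post e hdec hpre
  rw [pair_eq L pre post e hdec hpre, hfv, hbest]
  unfold emitPair
  split_ifs <;> rfl
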